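-- pv_equiv track=rewrite | github.com/joshuashevchuk1/LeetHackerQuestionsStudy | hacker/amnt/dsa/greedyGame.py | greedy_coin_game
-- ===== SOURCE A (Python) =====
-- import heapq
--
-- def greedy_coin_game(piles):
--     # Max heap (invert values for Python's min-heap)
--     max_heap = [-pile for pile in piles]
--     heapq.heapify(max_heap)
--
--     a_score = 0
--     b_score = 0
--     turn = 0
--
--     while max_heap:
--         max_pile = -heapq.heappop(max_heap)  # Take the largest pile
--         if turn % 2 == 0:
--             a_score += max_pile
--         else:
--             b_score += max_pile
--         turn += 1
--
--     return a_score, b_score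
-- ===== SOURCE B (Python) =====
-- def greedy_coin_game(piles):
--     ordered = sorted(piles, reverse=True)
--     a_score = 0
--     b_score = 0
--     for i, p in enumerate(ordered):
--         if i % 2 == 0:
--             a_score += p
--         else:
--             b_score += p
--     return a_score, b_score
-- ===== Notes on version B (the rewrite author's own statement) =====
-- stated objective: simpler
-- what changed: Replaces the heap plus while-heappop loop with one descending sort and a single enumerate pass that assigns each pile to a player by index parity.
import Mathlib
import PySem

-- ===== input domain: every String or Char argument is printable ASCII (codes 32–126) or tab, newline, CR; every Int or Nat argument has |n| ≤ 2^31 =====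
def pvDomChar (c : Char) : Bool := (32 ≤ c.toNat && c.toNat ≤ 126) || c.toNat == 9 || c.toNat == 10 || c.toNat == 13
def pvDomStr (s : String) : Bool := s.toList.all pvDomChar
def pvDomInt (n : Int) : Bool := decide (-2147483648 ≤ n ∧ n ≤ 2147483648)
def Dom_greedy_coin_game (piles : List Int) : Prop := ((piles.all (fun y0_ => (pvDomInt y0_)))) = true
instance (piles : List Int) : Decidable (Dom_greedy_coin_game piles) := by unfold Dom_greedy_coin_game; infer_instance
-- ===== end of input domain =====

-- B replaces A's heap + while-heappop loop with one descending sort and a single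
-- parity-indexed pass (objective: simpler).

-- ===== PORT A =====
-- A's max-heap is modelled as the list of negated piles; heappop removes and
-- returns the first minimal element (exact on the value level: heappop always
-- yields a minimum of the heap's multiset, and only the popped VALUE is used).
def pvHeapLoop (h : List Int) (a_score b_score turn : Int) : Int × Int :=
  match hm : PySem.List.min? h (fun x => x) with
  | none => (a_score, b_score)
  | some m =>
    if turn % 2 == 0 then
      pvHeapLoop (h.erase m) (a_score + -m) b_score (turn + 1)
    else
      pvHeapLoop (h.erase m) a_score (b_score + -m) (turn + 1)
termination_by h.length
decreasing_by
  all_goals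
    have hmem := PySem.List.min?_mem hm
    have := List.length_erase_of_mem hmem
    have := List.length_pos_of_mem hmem
    omega

def greedy_coin_game (piles : List Int) : Int × Int :=
  pvHeapLoop (piles.map (fun pile => -pile)) 0 0 0

-- ===== PORT B =====
def greedy_coin_game_alt (piles : List Int) : Int × Int :=
  let ordered := PySem.List.sorted piles (fun x => x) true
  (PySem.List.enumerate ordered).foldl
    (fun (s : Int × Int) ip =>
      if ip.1 % 2 == 0 then (s.1 + ip.2, s.2) else (s.1, s.2 + ip.2))
    (0, 0)

-- ===== PRECONDITION & SPEC =====
def Spec_greedy_coin_game (piles : List Int) (out : Int × Int) : Prop := out = greedy_coin_game_alt piles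
instance (piles : List Int) (out : Int × Int) : Decidable (Spec_greedy_coin_game piles out) := by unfold Spec_greedy_coin_game; infer_instance

-- ===== CLAIM (what is proved, stated in full; the proofs are below) =====
def Claim_equal_greedy_coin_game : Prop := ∀ (piles : List Int), Dom_greedy_coin_game piles → Spec_greedy_coin_game piles (greedy_coin_game piles)

-- ===== LEMMAS AND PROOFS =====

-- Reference loop: fold over a list adding each element to a_score/b_score by turn parity.
def pvParity (l : List Int) (a b t : Int) : Int × Int :=
  match l with
  | [] => (a, b)
  | x :: r => if t % 2 == 0 then pvParity r (a + x) b (t + 1) else pvParity r a (b + x) (t + 1)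

-- B's enumerate-fold is the parity loop.
theorem pvEnum_fold (l : List Int) (a b t : Int) :
    (PySem.List.enumerate l t).foldl
      (fun (s : Int × Int) ip =>
        if ip.1 % 2 == 0 then (s.1 + ip.2, s.2) else (s.1, s.2 + ip.2))
      (a, b) = pvParity l a b t := by
  induction l generalizing a b t with
  | nil => simp [PySem.List.enumerate_nil, pvParity]
  | cons x r ih =>
    rw [PySem.List.enumerate_cons]
    simp only [List.foldl_cons, pvParity]
    by_cases h : t % 2 == 0
    · rw [if_pos h, if_pos h]; exact ih _ _ _
    · rw [if_neg h, if_neg h]; exact ih _ _ _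

-- Popping the first minimum then sorting the rest gives the sorted list.
theorem pvSorted_min_cons (h : List Int) (m : Int)
    (hm : PySem.List.min? h (fun x => x) = some m) :
    PySem.List.sorted h (fun x => x) false =
      m :: PySem.List.sorted (h.erase m) (fun x => x) false := by
  apply PySem.List.sorted_id_eq_of_perm_of_pairwise
  · exact ((PySem.List.sorted_perm _ _ _).cons m).trans
      (List.perm_cons_erase (PySem.List.min?_mem hm)).symm
  · refine List.pairwise_cons.mpr ⟨?_, PySem.List.sorted_pairwise _ _⟩
    intro y hy
    have hy' : y ∈ h.erase m := (PySem.List.mem_sorted _ _ _ _).1 hy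
    exact PySem.List.min?_isMin hm y (List.mem_of_mem_erase hy')

-- A's heap loop is the parity loop over the ascending sort of the heap, negated back.
theorem pvHeapLoop_eq (h : List Int) (a b t : Int) :
    pvHeapLoop h a b t =
      pvParity ((PySem.List.sorted h (fun x => x) false).map (fun x => -x)) a b t := by
  induction hn : h.length using Nat.strong_induction_on generalizing h a b t with
  | _ n ih =>
  rw [pvHeapLoop]
  split
  · next hm =>
    have he : h = [] := (PySem.List.min?_eq_none_iff _ _).1 hm
    subst he
    simp [PySem.List.sorted, pvParity]
  · next m hm =>
    have hmem := PySem.List.min?_mem hm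
    have hl := List.length_erase_of_mem hmem
    have hp0 := List.length_pos_of_mem hmem
    rw [pvSorted_min_cons h m hm]
    simp only [List.map_cons, pvParity]
    subst hn
    by_cases hp : t % 2 == 0
    · rw [if_pos hp, if_pos hp]; exact ih _ (by omega) _ _ _ _ rfl
    · rw [if_neg hp, if_neg hp]; exact ih _ (by omega) _ _ _ _ rfl

-- Sorting the negated piles ascending = negating the descending sort of piles.
theorem pvSorted_neg (piles : List Int) :
    PySem.List.sorted (piles.map (fun pile => -pile)) (fun x => x) false =
      (PySem.List.sorted piles (fun x => x) true).map (fun x => -x) := by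
  apply PySem.List.sorted_id_eq_of_perm_of_pairwise
  · exact (PySem.List.sorted_perm _ _ _).map _
  · refine (PySem.List.sorted_pairwise_rev (key := fun x => x) piles).map _ ?_
    intro x y hxy
    simpa using neg_le_neg hxy

-- ===== VERDICT (by name: the statement is the Claim_ definition above) =====
theorem greedy_coin_game_spec : Claim_equal_greedy_coin_game := by
  intro piles _
  unfold Spec_greedy_coin_game greedy_coin_game greedy_coin_game_alt
  rw [pvHeapLoop_eq, pvSorted_neg, pvEnum_fold]
  simp [List.map_map]
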